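-- pv_equiv track=rewrite | github.com/JAGR1792/ASRD-2 | modulos_asdr/analisis.py | verificar_ll1
-- ===== SOURCE A (Python) =====
-- def verificar_ll1(producciones, predicciones):
--     conflictos = []
--     for A in sorted(producciones):
--         prods = [tuple(p) for p in producciones[A]]
--         for i in range(len(prods)):
--             for j in range(i + 1, len(prods)):
--                 p1 = prods[i]
--                 p2 = prods[j]
--                 inter = predicciones[(A, p1)] & predicciones[(A, p2)]
--                 if inter:
--                     conflictos.append((A, p1, p2, inter))
--     return len(conflictos) == 0, conflictos
-- ===== SOURCE B (Python) =====
-- def verificar_ll1(producciones, predicciones):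
--     # Inverted-index strategy: instead of intersecting every pair of prediction
--     # sets, build symbol -> [production indices] once per nonterminal, derive the
--     # clashing pairs from the postings, and only intersect those pairs.
--     conflictos = []
--     for A in sorted(producciones):
--         prods = [tuple(p) for p in producciones[A]]
--         if len(prods) < 2:
--             continue  # a single production can never conflict
--         occ = {}
--         for i, p in enumerate(prods):
--             for s in predicciones[(A, p)]:
--                 occ.setdefault(s, []).append(i)
--         clash = set()
--         for idxs in occ.values():
--             clash.update((x, y) for x in idxs for y in idxs if x < y)
--         for i, j in sorted(clash):
--             conflictos.append((A, prods[i], prods[j],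
--                                predicciones[(A, prods[i])] & predicciones[(A, prods[j])]))
--     return not conflictos, conflictos
-- ===== Notes on version B (the rewrite author's own statement) =====
-- stated objective: alternative
-- what changed: A intersects every pair of prediction sets per nonterminal; B builds an inverted index (symbol -> production indices) once per nonterminal, derives the clashing index pairs from the postings per shared symbol, and intersects only those pairs, emitting them in sorted (i,j) order.
import Mathlib
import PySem

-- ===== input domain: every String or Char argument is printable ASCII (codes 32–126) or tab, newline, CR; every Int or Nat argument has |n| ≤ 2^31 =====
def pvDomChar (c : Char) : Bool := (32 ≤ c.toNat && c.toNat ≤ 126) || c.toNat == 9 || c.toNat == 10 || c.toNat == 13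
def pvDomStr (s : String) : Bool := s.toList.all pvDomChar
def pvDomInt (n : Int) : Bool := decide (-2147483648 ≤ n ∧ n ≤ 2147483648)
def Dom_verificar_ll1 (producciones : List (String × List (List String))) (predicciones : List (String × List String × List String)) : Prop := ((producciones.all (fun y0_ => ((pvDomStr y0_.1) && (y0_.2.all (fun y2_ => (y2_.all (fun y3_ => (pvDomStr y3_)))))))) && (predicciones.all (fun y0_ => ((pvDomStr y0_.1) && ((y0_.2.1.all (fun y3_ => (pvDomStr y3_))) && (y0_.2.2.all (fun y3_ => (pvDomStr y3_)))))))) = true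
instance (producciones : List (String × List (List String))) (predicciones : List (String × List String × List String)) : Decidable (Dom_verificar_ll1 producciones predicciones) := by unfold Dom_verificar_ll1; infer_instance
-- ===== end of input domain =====

-- B replaces the all-pairs intersection scan by an inverted index (symbol -> production
-- indices): clashing pairs are derived from the postings and only those are intersected.

-- ===== PORT A =====
def verificar_ll1 (producciones : List (String × List (List String))) (predicciones : List (String × List String × List String)) : Bool × (List (String × List String × List String × List String)) :=
  let prodD := PySem.Dict.ofList producciones
  let predD := PySem.Dict.ofList (predicciones.map (fun e => ((e.1, e.2.1), e.2.2)))
  let conflictos :=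
    (PySem.List.sorted prodD.keys (fun x => x) false).foldl (fun acc A =>
      let prods := prodD.getD A []
      (PySem.List.pyRange 0 (prods.length : Int) 1).foldl (fun acc i =>
        (PySem.List.pyRange (i + 1) (prods.length : Int) 1).foldl (fun acc j =>
          let p1 := PySem.List.pyGetD prods i []
          let p2 := PySem.List.pyGetD prods j []
          -- predicciones[(A, p)] ported as getD; Pre_ excludes the KeyError inputs
          let inter := PySem.Set.inter (predD.getD (A, p1) []) (predD.getD (A, p2) [])
          if inter ≠ [] then acc ++ [(A, p1, p2, inter)] else acc) acc) acc) []
  (decide (conflictos.length = 0), conflictos)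

-- ===== PORT B =====
def verificar_ll1_alt (producciones : List (String × List (List String))) (predicciones : List (String × List String × List String)) : Bool × (List (String × List String × List String × List String)) :=
  let prodD := PySem.Dict.ofList producciones
  let predD := PySem.Dict.ofList (predicciones.map (fun e => ((e.1, e.2.1), e.2.2)))
  let conflictos :=
    (PySem.List.sorted prodD.keys (fun x => x) false).foldl (fun acc A =>
      let prods := prodD.getD A []
      -- a nonterminal with fewer than two productions can never conflict: skipped
      if prods.length < 2 then acc else
      -- occ: inverted index, symbol -> list of production indices predicting it
      let occ := (PySem.List.enumerate prods 0).foldl (fun occ ip =>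
        (predD.getD (A, ip.2) []).foldl
          (fun (occ : PySem.Dict String (List Int)) s => occ.modify s [] (· ++ [ip.1])) occ)
        PySem.Dict.empty
      -- clash: set of index pairs sharing at least one predicted symbol
      let clash := occ.values.foldl (fun cl idxs =>
        idxs.foldl (fun cl x =>
          idxs.foldl (fun (cl : PySem.Set (Int × Int)) y =>
            if x < y then cl.add (x, y) else cl) cl) cl) PySem.Set.empty
      (PySem.List.sorted2 clash (·.1) (·.2) false).foldl (fun acc ij =>
        let p1 := PySem.List.pyGetD prods ij.1 []
        let p2 := PySem.List.pyGetD prods ij.2 []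
        acc ++ [(A, p1, p2, PySem.Set.inter (predD.getD (A, p1) []) (predD.getD (A, p2) []))]) acc) []
  (conflictos.isEmpty, conflictos)

-- ===== PRECONDITION & SPEC =====
-- Pre_ excludes exactly the inputs on which Python A raises KeyError: a nonterminal with at
-- least two productions one of which has no entry in predicciones.
def Pre_verificar_ll1 (producciones : List (String × List (List String))) (predicciones : List (String × List String × List String)) : Prop :=
  ∀ e ∈ (PySem.Dict.ofList producciones).items, 2 ≤ e.2.length →
    ∀ p ∈ e.2, (PySem.Dict.ofList (predicciones.map (fun x => ((x.1, x.2.1), x.2.2)))).contains (e.1, p) = true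
instance (producciones : List (String × List (List String))) (predicciones : List (String × List String × List String)) : Decidable (Pre_verificar_ll1 producciones predicciones) := by unfold Pre_verificar_ll1; infer_instance

def pvWitness_verificar_ll1 : (List (String × List (List String))) × (List (String × List String × List String)) :=
  ([("S", [["a"], ["b"]])], [("S", ["a"], ["x", "y"]), ("S", ["b"], ["y"])])

def Spec_verificar_ll1 (producciones : List (String × List (List String))) (predicciones : List (String × List String × List String)) (out : Bool × (List (String × List String × List String × List String))) : Prop := out = verificar_ll1_alt producciones predicciones
instance (producciones : List (String × List (List String))) (predicciones : List (String × List String × List String)) (out : Bool × (List (String × List String × List String × List String))) : Decidable (Spec_verificar_ll1 producciones predicciones out) := by unfold Spec_verificar_ll1; infer_instance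

-- ===== CLAIM (what is proved, stated in full; the proofs are below) =====
def Claim_equal_verificar_ll1 : Prop := ∀ (producciones : List (String × List (List String))) (predicciones : List (String × List String × List String)), Dom_verificar_ll1 producciones predicciones → Pre_verificar_ll1 producciones predicciones → Spec_verificar_ll1 producciones predicciones (verificar_ll1 producciones predicciones)

-- ===== LEMMAS AND PROOFS =====

-- Abbreviations for the per-nonterminal data (pf abstracts the prediction lookup).
def pvPairs (pf : List String → List String) (prods : List (List String)) : List (String × Int) :=
  (PySem.List.enumerate prods 0).flatMap (fun ip => (pf ip.2).map (fun s => (s, ip.1)))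

def pvOcc (pf : List String → List String) (prods : List (List String)) : PySem.Dict String (List Int) :=
  (PySem.List.enumerate prods 0).foldl (fun occ ip =>
    (pf ip.2).foldl (fun (occ : PySem.Dict String (List Int)) s => occ.modify s [] (· ++ [ip.1])) occ)
    PySem.Dict.empty

def pvClash (pf : List String → List String) (prods : List (List String)) : PySem.Set (Int × Int) :=
  (pvOcc pf prods).values.foldl (fun cl idxs =>
    idxs.foldl (fun cl x =>
      idxs.foldl (fun (cl : PySem.Set (Int × Int)) y =>
        if x < y then cl.add (x, y) else cl) cl) cl) PySem.Set.empty

def pvInter (pf : List String → List String) (prods : List (List String)) (i j : Int) : List String :=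
  PySem.Set.inter (pf (PySem.List.pyGetD prods i [])) (pf (PySem.List.pyGetD prods j []))

def pvLA (pf : List String → List String) (prods : List (List String)) : List (Int × Int) :=
  (PySem.List.pyRange 0 (prods.length : Int) 1).flatMap (fun i =>
    ((PySem.List.pyRange (i + 1) (prods.length : Int) 1).filter
      (fun j => decide (pvInter pf prods i j ≠ []))).map (fun j => (i, j)))

def pvEnc (m : Int) (p : Int × Int) : Int := p.1 * m + p.2

theorem pvOcc_eq_foldl_pairs (pf : List String → List String) (prods : List (List String)) :
    pvOcc pf prods = (pvPairs pf prods).foldl (fun d p => d.modify p.1 [] (· ++ [p.2])) PySem.Dict.empty := by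
  unfold pvOcc pvPairs
  rw [List.foldl_flatMap]
  simp only [List.foldl_map]

theorem mem_pvPairs (pf : List String → List String) (prods : List (List String)) (s : String) (i : Int) :
    (s, i) ∈ pvPairs pf prods ↔ ∃ (k : Nat) (h : k < prods.length), i = (k : Int) ∧ s ∈ pf prods[k] := by
  simp only [pvPairs, List.mem_flatMap, PySem.List.mem_enumerate_iff, List.mem_map]
  constructor
  · rintro ⟨ip, ⟨k, hk, rfl⟩, s', hs', heq⟩
    obtain ⟨rfl, rfl⟩ := Prod.mk.injEq .. ▸ heq
    exact ⟨k, hk, by simp, by simpa using hs'⟩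
  · rintro ⟨k, hk, rfl, hs⟩
    exact ⟨(((k : Int)), prods[k]), ⟨k, hk, by simp⟩, s, hs, rfl⟩

theorem getD_pvOcc (pf : List String → List String) (prods : List (List String)) (s : String) :
    (pvOcc pf prods).getD s [] = ((pvPairs pf prods).filter (·.1 == s)).map (·.2) := by
  rw [pvOcc_eq_foldl_pairs, PySem.Dict.getD_foldl_modify_append]
  simp [PySem.Dict.getD_empty]

theorem mem_getD_pvOcc (pf : List String → List String) (prods : List (List String)) (s : String) (i : Int) :
    i ∈ (pvOcc pf prods).getD s [] ↔ (s, i) ∈ pvPairs pf prods := by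
  rw [getD_pvOcc]
  simp only [List.mem_map, List.mem_filter, beq_iff_eq]
  constructor
  · rintro ⟨⟨s', i'⟩, ⟨hp, rfl⟩, rfl⟩
    exact hp
  · intro h
    exact ⟨(s, i), ⟨h, rfl⟩, rfl⟩

theorem keys_pvOcc (pf : List String → List String) (prods : List (List String)) :
    (pvOcc pf prods).keys = PySem.Set.ofList ((pvPairs pf prods).map (·.1)) := by
  rw [pvOcc_eq_foldl_pairs]
  rw [PySem.Dict.keys_foldl_modify_key (pvPairs pf prods) (fun p => p.1) [] (fun _ p => (· ++ [p.2])) PySem.Dict.empty]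
  rw [PySem.Dict.keys_empty, PySem.Set.update_nil_left]

theorem nodup_keys_pvOcc (pf : List String → List String) (prods : List (List String)) :
    (pvOcc pf prods).keys.Nodup := by
  rw [pvOcc_eq_foldl_pairs]
  exact PySem.Dict.nodup_keys_foldl_modify_key (pvPairs pf prods) (fun p => p.1) [] (fun _ p => (· ++ [p.2])) PySem.Dict.empty PySem.Dict.nodup_keys_empty

theorem mem_keys_pvOcc (pf : List String → List String) (prods : List (List String)) (s : String) :
    s ∈ (pvOcc pf prods).keys ↔ ∃ i, (s, i) ∈ pvPairs pf prods := by
  rw [keys_pvOcc]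
  simp only [PySem.Set.mem_ofList, List.mem_map]
  constructor
  · rintro ⟨⟨s', i⟩, hp, rfl⟩
    exact ⟨i, hp⟩
  · rintro ⟨i, hp⟩
    exact ⟨(s, i), hp, rfl⟩

-- membership through the clash-building folds
theorem mem_clash_inner (idxs : List Int) (x : Int) (cl : PySem.Set (Int × Int)) (a : Int × Int) :
    a ∈ idxs.foldl (fun cl y => if x < y then PySem.Set.add cl (x, y) else cl) cl ↔
      a ∈ cl ∨ ∃ y ∈ idxs, x < y ∧ a = (x, y) := by
  induction idxs generalizing cl with
  | nil => simp
  | cons y t ih =>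
    simp only [List.foldl_cons]
    by_cases hxy : x < y
    · simp only [if_pos hxy, ih, PySem.Set.mem_add, List.mem_cons]
      constructor
      · rintro ((h | rfl) | ⟨y', hy', h1, rfl⟩)
        · exact Or.inl h
        · exact Or.inr ⟨y, Or.inl rfl, hxy, rfl⟩
        · exact Or.inr ⟨y', Or.inr hy', h1, rfl⟩
      · rintro (h | ⟨y', (rfl | hy'), h1, rfl⟩)
        · exact Or.inl (Or.inl h)
        · exact Or.inl (Or.inr rfl)
        · exact Or.inr ⟨y', hy', h1, rfl⟩
    · simp only [if_neg hxy, ih, List.mem_cons]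
      constructor
      · rintro (h | ⟨y', hy', h1, rfl⟩)
        · exact Or.inl h
        · exact Or.inr ⟨y', Or.inr hy', h1, rfl⟩
      · rintro (h | ⟨y', (rfl | hy'), h1, rfl⟩)
        · exact Or.inl h
        · exact absurd h1 hxy
        · exact Or.inr ⟨y', hy', h1, rfl⟩

theorem mem_clash_mid (idxs : List Int) (l2 : List Int) (cl : PySem.Set (Int × Int)) (a : Int × Int) :
    a ∈ idxs.foldl (fun cl x => l2.foldl (fun cl y => if x < y then PySem.Set.add cl (x, y) else cl) cl) cl ↔
      a ∈ cl ∨ ∃ x ∈ idxs, ∃ y ∈ l2, x < y ∧ a = (x, y) := by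
  induction idxs generalizing cl with
  | nil => simp
  | cons x t ih =>
    simp only [List.foldl_cons, ih, mem_clash_inner, List.mem_cons]
    constructor
    · rintro ((h | ⟨y, hy, h1, rfl⟩) | ⟨x', hx', y, hy, h1, rfl⟩)
      · exact Or.inl h
      · exact Or.inr ⟨x, Or.inl rfl, y, hy, h1, rfl⟩
      · exact Or.inr ⟨x', Or.inr hx', y, hy, h1, rfl⟩
    · rintro (h | ⟨x', (rfl | hx'), y, hy, h1, rfl⟩)
      · exact Or.inl (Or.inl h)
      · exact Or.inl (Or.inr ⟨y, hy, h1, rfl⟩)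
      · exact Or.inr ⟨x', hx', y, hy, h1, rfl⟩

theorem mem_clash_outer (vals : List (List Int)) (cl : PySem.Set (Int × Int)) (a : Int × Int) :
    a ∈ vals.foldl (fun cl idxs =>
        idxs.foldl (fun cl x =>
          idxs.foldl (fun (cl : PySem.Set (Int × Int)) y =>
            if x < y then cl.add (x, y) else cl) cl) cl) cl ↔
      a ∈ cl ∨ ∃ idxs ∈ vals, ∃ x ∈ idxs, ∃ y ∈ idxs, x < y ∧ a = (x, y) := by
  induction vals generalizing cl with
  | nil => simp
  | cons idxs t ih =>
    simp only [List.foldl_cons, ih, mem_clash_mid, List.mem_cons]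
    constructor
    · rintro ((h | ⟨x, hx, y, hy, h1, rfl⟩) | ⟨idxs', hi, x, hx, y, hy, h1, rfl⟩)
      · exact Or.inl h
      · exact Or.inr ⟨idxs, Or.inl rfl, x, hx, y, hy, h1, rfl⟩
      · exact Or.inr ⟨idxs', Or.inr hi, x, hx, y, hy, h1, rfl⟩
    · rintro (h | ⟨idxs', (rfl | hi), x, hx, y, hy, h1, rfl⟩)
      · exact Or.inl (Or.inl h)
      · exact Or.inl (Or.inr ⟨x, hx, y, hy, h1, rfl⟩)
      · exact Or.inr ⟨idxs', hi, x, hx, y, hy, h1, rfl⟩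

theorem nodup_clash_inner (idxs : List Int) (x : Int) (cl : PySem.Set (Int × Int)) (h : cl.Nodup) :
    (idxs.foldl (fun cl y => if x < y then PySem.Set.add cl (x, y) else cl) cl).Nodup := by
  induction idxs generalizing cl with
  | nil => simpa using h
  | cons y t ih =>
    simp only [List.foldl_cons]
    by_cases hxy : x < y
    · rw [if_pos hxy]
      exact ih _ (PySem.Set.nodup_add cl (x, y) h)
    · rw [if_neg hxy]
      exact ih _ h

theorem nodup_clash_mid (idxs l2 : List Int) (cl : PySem.Set (Int × Int)) (h : cl.Nodup) :
    (idxs.foldl (fun cl x => l2.foldl (fun cl y => if x < y then PySem.Set.add cl (x, y) else cl) cl) cl).Nodup := by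
  induction idxs generalizing cl with
  | nil => simpa using h
  | cons x t ih =>
    simp only [List.foldl_cons]
    exact ih _ (nodup_clash_inner l2 x cl h)

theorem nodup_clash_outer (vals : List (List Int)) (cl : PySem.Set (Int × Int)) (h : cl.Nodup) :
    (vals.foldl (fun cl idxs =>
      idxs.foldl (fun cl x =>
        idxs.foldl (fun (cl : PySem.Set (Int × Int)) y =>
          if x < y then cl.add (x, y) else cl) cl) cl) cl).Nodup := by
  induction vals generalizing cl with
  | nil => simpa using h
  | cons idxs t ih =>
    simp only [List.foldl_cons]
    exact ih _ (nodup_clash_mid idxs idxs cl h)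

theorem nodup_pvClash (pf : List String → List String) (prods : List (List String)) :
    (pvClash pf prods).Nodup := by
  unfold pvClash
  exact nodup_clash_outer _ _ List.nodup_nil

theorem mem_pvClash (pf : List String → List String) (prods : List (List String)) (a : Int × Int) :
    a ∈ pvClash pf prods ↔ a.1 < a.2 ∧ ∃ s, (s, a.1) ∈ pvPairs pf prods ∧ (s, a.2) ∈ pvPairs pf prods := by
  unfold pvClash
  rw [mem_clash_outer]
  simp only [PySem.Set.empty, List.not_mem_nil, false_or]
  rw [PySem.Dict.values_eq_map_keys (pvOcc pf prods) (nodup_keys_pvOcc pf prods) []]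
  constructor
  · rintro ⟨idxs, hidxs, x, hx, y, hy, h1, rfl⟩
    rw [List.mem_map] at hidxs
    obtain ⟨s, hs, rfl⟩ := hidxs
    rw [mem_getD_pvOcc] at hx hy
    exact ⟨h1, s, hx, hy⟩
  · rintro ⟨h1, s, hx, hy⟩
    refine ⟨(pvOcc pf prods).getD s [], List.mem_map.mpr ⟨s, ?_, rfl⟩, a.1, ?_, a.2, ?_, h1, rfl⟩
    · exact (mem_keys_pvOcc pf prods s).mpr ⟨a.1, hx⟩
    · exact (mem_getD_pvOcc pf prods s a.1).mpr hx
    · exact (mem_getD_pvOcc pf prods s a.2).mpr hy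

theorem pvInter_ne_nil_iff (pf : List String → List String) (prods : List (List String)) (i j : Int) :
    pvInter pf prods i j ≠ [] ↔ ∃ s, s ∈ pf (PySem.List.pyGetD prods i []) ∧ s ∈ pf (PySem.List.pyGetD prods j []) := by
  unfold pvInter PySem.Set.inter
  rw [Ne, List.filter_eq_nil_iff]
  simp only [not_forall, not_not, PySem.Set.contains_iff]
  constructor
  · rintro ⟨s, hs, h⟩; exact ⟨s, hs, h⟩
  · rintro ⟨s, hs1, hs2⟩; exact ⟨s, hs1, hs2⟩

theorem mem_pvLA (pf : List String → List String) (prods : List (List String)) (a : Int × Int) :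
    a ∈ pvLA pf prods ↔ 0 ≤ a.1 ∧ a.1 < a.2 ∧ a.2 < (prods.length : Int) ∧ pvInter pf prods a.1 a.2 ≠ [] := by
  obtain ⟨i, j⟩ := a
  simp only [pvLA, List.mem_flatMap, List.mem_map, List.mem_filter, PySem.List.mem_pyRange_one,
    decide_eq_true_eq, Prod.mk.injEq]
  constructor
  · rintro ⟨i', ⟨h0, hn⟩, j', ⟨⟨hj1, hj2⟩, hne⟩, rfl, rfl⟩
    exact ⟨h0, by omega, hj2, hne⟩
  · rintro ⟨h0, hij, hjn, hne⟩
    exact ⟨i, ⟨h0, by omega⟩, j, ⟨⟨by omega, hjn⟩, hne⟩, rfl, rfl⟩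

theorem mem_pvClash_iff_mem_pvLA (pf : List String → List String) (prods : List (List String)) (a : Int × Int) :
    a ∈ pvClash pf prods ↔ a ∈ pvLA pf prods := by
  rw [mem_pvClash, mem_pvLA, pvInter_ne_nil_iff]
  constructor
  · rintro ⟨h1, s, hx, hy⟩
    rw [mem_pvPairs] at hx hy
    obtain ⟨k, hk, hak, hsk⟩ := hx
    obtain ⟨l, hl, hal, hsl⟩ := hy
    refine ⟨by omega, h1, by omega, s, ?_, ?_⟩
    · rw [hak, PySem.List.pyGetD_natCast, List.getD_eq_getElem _ _ hk]
      exact hsk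
    · rw [hal, PySem.List.pyGetD_natCast, List.getD_eq_getElem _ _ hl]
      exact hsl
  · rintro ⟨h0, hij, hjn, s, hs1, hs2⟩
    have h02 : (0 : Int) ≤ a.2 := by omega
    refine ⟨hij, s, ?_, ?_⟩
    · rw [mem_pvPairs]
      refine ⟨a.1.toNat, by omega, by omega, ?_⟩
      have : ((a.1.toNat : Nat) : Int) = a.1 := by omega
      rw [← List.getD_eq_getElem _ ([] : List String), ← PySem.List.pyGetD_natCast, this]
      exact hs1
    · rw [mem_pvPairs]
      refine ⟨a.2.toNat, by omega, by omega, ?_⟩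
      have : ((a.2.toNat : Nat) : Int) = a.2 := by omega
      rw [← List.getD_eq_getElem _ ([] : List String), ← PySem.List.pyGetD_natCast, this]
      exact hs2

theorem pairwise_pvLA (pf : List String → List String) (prods : List (List String)) :
    (pvLA pf prods).Pairwise (fun a b => pvEnc ((prods.length : Int) + 1) a < pvEnc ((prods.length : Int) + 1) b) := by
  unfold pvLA
  rw [List.pairwise_flatMap]
  constructor
  · intro i _
    rw [List.pairwise_map]
    refine List.Pairwise.filter _ ?_
    refine (PySem.List.pairwise_lt_pyRange_one (i + 1) (prods.length : Int)).imp ?_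
    intro j1 j2 h
    simpa [pvEnc] using h
  · refine List.Pairwise.imp_of_mem ?_ (PySem.List.pairwise_lt_pyRange_one 0 (prods.length : Int))
    intro i1 i2 hi1 hi2 hlt x hx y hy
    rw [PySem.List.mem_pyRange_one] at hi1 hi2
    rw [List.mem_map] at hx hy
    obtain ⟨j1, hj1, rfl⟩ := hx
    obtain ⟨j2, hj2, rfl⟩ := hy
    rw [List.mem_filter, PySem.List.mem_pyRange_one] at hj1 hj2
    simp only [pvEnc]
    have hm : (0 : Int) < (prods.length : Int) + 1 := by omega
    have h1 : i1 * ((prods.length : Int) + 1) + j1 < (i1 + 1) * ((prods.length : Int) + 1) := by nlinarith [hj1.1.2]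
    have h2 : (i1 + 1) * ((prods.length : Int) + 1) ≤ i2 * ((prods.length : Int) + 1) :=
      mul_le_mul_of_nonneg_right (by omega) (le_of_lt hm)
    have h3 : (0 : Int) ≤ j2 := by omega
    linarith

theorem nodup_pvLA (pf : List String → List String) (prods : List (List String)) :
    (pvLA pf prods).Nodup := by
  refine (pairwise_pvLA pf prods).imp ?_
  intro a b h hab
  rw [hab] at h
  exact lt_irrefl _ h

theorem sorted_pvClash (pf : List String → List String) (prods : List (List String)) :
    PySem.List.sorted (pvClash pf prods) (pvEnc ((prods.length : Int) + 1)) false = pvLA pf prods := by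
  refine PySem.List.sorted_eq_of_perm_of_pairwise_lt _ _ _ ?_ (pairwise_pvLA pf prods)
  refine (List.perm_ext_iff_of_nodup (nodup_pvLA pf prods) (nodup_pvClash pf prods)).mpr ?_
  intro a
  exact (mem_pvClash_iff_mem_pvLA pf prods a).symm

-- insertion-sort comparator congruence
theorem insertBy_cons {α : Type} (f : α → α → Bool) (x y : α) (ys : List α) :
    PySem.List.insertBy f x (y :: ys) = if f x y then x :: y :: ys else y :: PySem.List.insertBy f x ys := rfl

theorem insertBy_congr {α : Type} (f g : α → α → Bool) (x : α) (acc : List α)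
    (h : ∀ b ∈ acc, f x b = g x b) : PySem.List.insertBy f x acc = PySem.List.insertBy g x acc := by
  induction acc with
  | nil => rfl
  | cons y ys ih =>
    rw [insertBy_cons, insertBy_cons, h y (List.mem_cons_self ..)]
    by_cases hg : g x y
    · simp [hg]
    · simp only [hg, if_neg, Bool.false_eq_true, not_false_iff]
      rw [ih (fun b hb => h b (List.mem_cons_of_mem _ hb))]

theorem foldl_insertBy_congr {α : Type} (f g : α → α → Bool) (S : α → Prop) (xs : List α) (acc : List α)
    (hxs : ∀ x ∈ xs, S x) (hacc : ∀ x ∈ acc, S x) (h : ∀ a b, S a → S b → f a b = g a b) :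
    xs.foldl (fun acc x => PySem.List.insertBy f x acc) acc = xs.foldl (fun acc x => PySem.List.insertBy g x acc) acc := by
  induction xs generalizing acc with
  | nil => rfl
  | cons x t ih =>
    simp only [List.foldl_cons]
    rw [insertBy_congr f g x acc (fun b hb => h x b (hxs x (List.mem_cons_self ..)) (hacc b hb))]
    refine ih _ (fun z hz => hxs z (List.mem_cons_of_mem _ hz)) (fun z hz => ?_) 
    rcases (PySem.List.mem_insertBy _ _ _ _).mp hz with rfl | hz'
    · exact hxs z (List.mem_cons_self ..)
    · exact hacc z hz'

theorem lex_comparator_eq (m : Int) (a b : Int × Int)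
    (ha : 0 ≤ a.1 ∧ 0 ≤ a.2 ∧ a.2 < m) (hb : 0 ≤ b.1 ∧ 0 ≤ b.2 ∧ b.2 < m) :
    (decide (a.1 < b.1) || (!decide (b.1 < a.1) && decide (a.2 < b.2))) = decide (pvEnc m a < pvEnc m b) := by
  obtain ⟨ha1, ha2, ha3⟩ := ha
  obtain ⟨hb1, hb2, hb3⟩ := hb
  have hm : (0 : Int) < m := by omega
  rw [Bool.eq_iff_iff]
  simp only [Bool.or_eq_true, Bool.and_eq_true, Bool.not_eq_eq_eq_not, Bool.not_true,
    decide_eq_true_eq, decide_eq_false_iff_not, pvEnc]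
  constructor
  · rintro (h | ⟨h1, h2⟩)
    · have h2 : (a.1 + 1) * m ≤ b.1 * m := mul_le_mul_of_nonneg_right (by omega) (le_of_lt hm)
      nlinarith
    · rcases lt_or_eq_of_le (not_lt.mp h1) with h | h
      · have h2' : (a.1 + 1) * m ≤ b.1 * m := mul_le_mul_of_nonneg_right (by omega) (le_of_lt hm)
        nlinarith
      · have : a.1 * m = b.1 * m := by rw [h]
        linarith
  · intro h
    by_contra hc
    push_neg at hc
    obtain ⟨h1, h2⟩ := hc
    rcases lt_or_eq_of_le h1 with hba | hba
    · have h3 : (b.1 + 1) * m ≤ a.1 * m := mul_le_mul_of_nonneg_right (by omega) (le_of_lt hm)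
      nlinarith
    · have h2' := h2 (le_of_eq hba.symm)
      have : b.1 * m = a.1 * m := by rw [hba]
      linarith

theorem bounds_pvClash (pf : List String → List String) (prods : List (List String)) (a : Int × Int)
    (h : a ∈ pvClash pf prods) : 0 ≤ a.1 ∧ 0 ≤ a.2 ∧ a.2 < (prods.length : Int) + 1 := by
  rw [mem_pvClash_iff_mem_pvLA, mem_pvLA] at h
  obtain ⟨h0, hij, hjn, _⟩ := h
  exact ⟨h0, by omega, by omega⟩

theorem sorted2_pvClash (pf : List String → List String) (prods : List (List String)) :
    PySem.List.sorted2 (pvClash pf prods) (·.1) (·.2) false = pvLA pf prods := by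
  have h1 : PySem.List.sorted2 (pvClash pf prods) (·.1) (·.2) false =
      (pvClash pf prods).foldl (fun acc x => PySem.List.insertBy
        (fun a b => decide (a.1 < b.1) || (!decide (b.1 < a.1) && decide (a.2 < b.2))) x acc) [] := rfl
  rw [h1, ← sorted_pvClash pf prods, PySem.List.sorted_eq_foldl_insertBy]
  exact foldl_insertBy_congr _ _ (fun p => 0 ≤ p.1 ∧ 0 ≤ p.2 ∧ p.2 < (prods.length : Int) + 1)
    (pvClash pf prods) [] (fun x hx => bounds_pvClash pf prods x hx) (by simp)
    (fun a b hSa hSb => lex_comparator_eq ((prods.length : Int) + 1) a b hSa hSb)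

-- the per-nonterminal block of A equals the per-nonterminal block of B
theorem block_eq (Aname : String) (pf : List String → List String) (prods : List (List String))
    (acc : List (String × List String × List String × List String)) :
    (PySem.List.pyRange 0 (prods.length : Int) 1).foldl (fun acc i =>
      (PySem.List.pyRange (i + 1) (prods.length : Int) 1).foldl (fun acc j =>
        if PySem.Set.inter (pf (PySem.List.pyGetD prods i [])) (pf (PySem.List.pyGetD prods j [])) ≠ [] then
          acc ++ [(Aname, PySem.List.pyGetD prods i [], PySem.List.pyGetD prods j [],
            PySem.Set.inter (pf (PySem.List.pyGetD prods i [])) (pf (PySem.List.pyGetD prods j [])))]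
        else acc) acc) acc
    = (PySem.List.sorted2 (pvClash pf prods) (·.1) (·.2) false).foldl (fun acc ij =>
        acc ++ [(Aname, PySem.List.pyGetD prods ij.1 [], PySem.List.pyGetD prods ij.2 [],
          PySem.Set.inter (pf (PySem.List.pyGetD prods ij.1 [])) (pf (PySem.List.pyGetD prods ij.2 [])))]) acc := by
  conv_rhs => rw [PySem.List.foldl_append_singleton_eq_map]
  rw [sorted2_pvClash]
  simp only [PySem.List.foldl_append_ite (fun j => PySem.Set.inter _ _ ≠ []), PySem.List.foldl_append_eq_flatMap]
  unfold pvLA pvInter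
  simp only [List.map_flatMap, List.map_map, Function.comp_def]

theorem blockA_small (Aname : String) (pf : List String → List String) (prods : List (List String))
    (acc : List (String × List String × List String × List String)) (h : prods.length < 2) :
    (PySem.List.pyRange 0 (prods.length : Int) 1).foldl (fun acc i =>
      (PySem.List.pyRange (i + 1) (prods.length : Int) 1).foldl (fun acc j =>
        if PySem.Set.inter (pf (PySem.List.pyGetD prods i [])) (pf (PySem.List.pyGetD prods j [])) ≠ [] then
          acc ++ [(Aname, PySem.List.pyGetD prods i [], PySem.List.pyGetD prods j [],
            PySem.Set.inter (pf (PySem.List.pyGetD prods i [])) (pf (PySem.List.pyGetD prods j [])))]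
        else acc) acc) acc = acc := by
  obtain h0 | h1 : prods.length = 0 ∨ prods.length = 1 := by omega
  · rw [h0]
    rw [show ((0 : Nat) : Int) = 0 by rfl, PySem.List.pyRange_one_eq_nil (le_refl 0)]
    rfl
  · rw [h1]
    rw [show ((1 : Nat) : Int) = 0 + 1 by rfl, PySem.List.pyRange_one_singleton]
    simp only [List.foldl_cons, List.foldl_nil]
    rw [PySem.List.pyRange_one_eq_nil (by omega)]
    rfl

theorem isEmpty_eq_decide (l : List (String × List String × List String × List String)) :
    l.isEmpty = decide (l.length = 0) := by cases l <;> rfl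

theorem outer_eq (ks : List String) (prodD : PySem.Dict String (List (List String)))
    (predD : PySem.Dict (String × List String) (List String))
    (acc : List (String × List String × List String × List String)) :
    ks.foldl (fun acc A =>
      (PySem.List.pyRange 0 (((prodD.getD A []).length : Int)) 1).foldl (fun acc i =>
        (PySem.List.pyRange (i + 1) (((prodD.getD A []).length : Int)) 1).foldl (fun acc j =>
          if PySem.Set.inter (predD.getD (A, PySem.List.pyGetD (prodD.getD A []) i []) [])
              (predD.getD (A, PySem.List.pyGetD (prodD.getD A []) j []) []) ≠ [] then
            acc ++ [(A, PySem.List.pyGetD (prodD.getD A []) i [], PySem.List.pyGetD (prodD.getD A []) j [],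
              PySem.Set.inter (predD.getD (A, PySem.List.pyGetD (prodD.getD A []) i []) [])
                (predD.getD (A, PySem.List.pyGetD (prodD.getD A []) j []) []))]
          else acc) acc) acc) acc
    = ks.foldl (fun acc A =>
        if (prodD.getD A []).length < 2 then acc else
        (PySem.List.sorted2 (((PySem.List.enumerate (prodD.getD A []) 0).foldl (fun occ ip =>
            (predD.getD (A, ip.2) []).foldl
              (fun (occ : PySem.Dict String (List Int)) s => occ.modify s [] (· ++ [ip.1])) occ)
            PySem.Dict.empty).values.foldl (fun cl idxs =>
              idxs.foldl (fun cl x =>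
                idxs.foldl (fun (cl : PySem.Set (Int × Int)) y =>
                  if x < y then cl.add (x, y) else cl) cl) cl) PySem.Set.empty) (·.1) (·.2) false).foldl
          (fun acc ij =>
            acc ++ [(A, PySem.List.pyGetD (prodD.getD A []) ij.1 [], PySem.List.pyGetD (prodD.getD A []) ij.2 [],
              PySem.Set.inter (predD.getD (A, PySem.List.pyGetD (prodD.getD A []) ij.1 []) [])
                (predD.getD (A, PySem.List.pyGetD (prodD.getD A []) ij.2 []) []))]) acc) acc := by
  apply PySem.List.foldl_congr_mem
  intro acc A _
  by_cases hn : (prodD.getD A []).length < 2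
  · rw [if_pos hn]
    exact blockA_small A (fun p => predD.getD (A, p) []) (prodD.getD A []) acc hn
  · rw [if_neg hn]
    exact block_eq A (fun p => predD.getD (A, p) []) (prodD.getD A []) acc

-- ===== VERDICT (by name: the statement is the Claim_ definition above) =====
theorem verificar_ll1_spec : Claim_equal_verificar_ll1 := by
  intro producciones predicciones _ _
  unfold Spec_verificar_ll1
  simp only [verificar_ll1, verificar_ll1_alt]
  rw [outer_eq, isEmpty_eq_decide]
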